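-- pv_equiv track=rewrite | github.com/oleksandr-medviediev/campus_2018_python | Volodymyr_Kuksa/3/Matrix.py | read_matrix_columns
-- ===== SOURCE A (Python) =====
-- def matrix_str_to_list(matrix_as_str):
--
--     matrix_as_lists = []
--     matrix_rows = matrix_as_str.split('\n')
--
--     for row in matrix_rows:
--
--         matrix_as_lists.append(row.split())
--
--         for i in range(len(matrix_as_lists[-1])):
--
--             matrix_as_lists[-1][i] = int(matrix_as_lists[-1][i])
--
--     return matrix_as_lists
--
-- def read_matrix_columns(matrix_as_str):
--
--     matrix_as_lists = matrix_str_to_list(matrix_as_str)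
--     result = ''
--
--     for i in range(len(matrix_as_lists[0])):
--
--         column = []
--
--         for j in range(len(matrix_as_lists)):
--
--             column.append(matrix_as_lists[j][i])
--
--         result += str(column) + '\n'
--
--     return result
-- ===== SOURCE B (Python) =====
-- def read_matrix_columns(matrix_as_str):
--
--     rows = [[int(tok) for tok in line.split()] for line in matrix_as_str.split('\n')]
--     width = len(rows[0])
--
--     columns = [[] for _ in range(width)]
--     for row in rows:
--         columns = [columns[i] + [row[i]] for i in range(width)]
--
--     return ''.join(str(column) + '\n' for column in columns)
-- ===== Notes on version B (the rewrite author's own statement) =====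
-- stated objective: alternative
-- what changed: A builds each column by a fresh column-major scan over all rows for every column index; B makes a single row-major pass that extends all column accumulators at once, then joins them.
import Mathlib
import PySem

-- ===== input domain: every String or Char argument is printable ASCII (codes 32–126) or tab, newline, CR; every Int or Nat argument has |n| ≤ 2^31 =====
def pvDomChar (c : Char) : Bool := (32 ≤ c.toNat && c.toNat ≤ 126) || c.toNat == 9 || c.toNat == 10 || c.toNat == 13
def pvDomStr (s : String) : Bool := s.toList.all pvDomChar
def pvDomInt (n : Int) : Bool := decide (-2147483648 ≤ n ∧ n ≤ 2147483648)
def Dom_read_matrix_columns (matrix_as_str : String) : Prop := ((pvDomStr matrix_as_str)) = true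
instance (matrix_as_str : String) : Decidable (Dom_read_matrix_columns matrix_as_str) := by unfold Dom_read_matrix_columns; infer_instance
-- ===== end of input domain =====

-- B replaces A's per-column rescans of the row list by one row-major pass extending all column
-- accumulators at once (objective: alternative decomposition, same asymptotic cost).

-- str(column) for a Python list of ints (used by both ports, as both Pythons call str(list))
def pvIntListStr (l : List Int) : String :=
  "[" ++ PySem.Str.join ", " (l.map PySem.Int.toStr) ++ "]"

-- ===== PORT A =====
-- A's in-place 'matrix_as_lists[-1][i] = int(...)' loop converts every token of the freshly
-- appended row; ported as the map over that row's tokens (same values, same order).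
def matrix_str_to_list (matrix_as_str : String) : List (List Int) :=
  ((PySem.Str.split? matrix_as_str "\n").getD []).foldl
    (fun acc row => acc ++ [(PySem.Str.split₀ row).map (fun tok => (PySem.Int.ofStr? tok).getD 0)])
    []

def read_matrix_columns (matrix_as_str : String) : String :=
  let matrix_as_lists := matrix_str_to_list matrix_as_str
  (PySem.List.pyRange 0 ((PySem.List.pyGetD matrix_as_lists 0 []).length : Int) 1).foldl
    (fun result i =>
      let column := (PySem.List.pyRange 0 (matrix_as_lists.length : Int) 1).foldl
        (fun col j => col ++ [PySem.List.pyGetD (PySem.List.pyGetD matrix_as_lists j []) i 0]) []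
      result ++ (pvIntListStr column ++ "\n"))
    ""

-- ===== PORT B =====
def read_matrix_columns_alt (matrix_as_str : String) : String :=
  let rows := ((PySem.Str.split? matrix_as_str "\n").getD []).map
    (fun line => (PySem.Str.split₀ line).map (fun tok => (PySem.Int.ofStr? tok).getD 0))
  let width : Int := ((PySem.List.pyGetD rows 0 []).length : Int)
  let columns := rows.foldl
    (fun cols row => (PySem.List.pyRange 0 width 1).map
      (fun i => PySem.List.pyGetD cols i [] ++ [PySem.List.pyGetD row i 0]))
    ((PySem.List.pyRange 0 width 1).map (fun _ => ([] : List Int)))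
  PySem.Str.join "" (columns.map (fun column => pvIntListStr column ++ "\n"))

-- ===== PRECONDITION & SPEC =====
-- Pre_ excludes exactly the inputs where the Python raises: a token int() rejects (ValueError)
-- or a row shorter than the first row (IndexError while reading that column entry).
def Pre_read_matrix_columns (matrix_as_str : String) : Prop :=
  ∀ line ∈ (PySem.Str.split? matrix_as_str "\n").getD [],
    (PySem.Str.split₀ (((PySem.Str.split? matrix_as_str "\n").getD []).headD "")).length
        ≤ (PySem.Str.split₀ line).length
    ∧ ∀ tok ∈ PySem.Str.split₀ line, PySem.Int.ofStr? tok ≠ none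

instance (matrix_as_str : String) : Decidable (Pre_read_matrix_columns matrix_as_str) := by
  unfold Pre_read_matrix_columns; infer_instance

def pvWitness_read_matrix_columns : String := "1 2 3\n4 5 6"

def Spec_read_matrix_columns (matrix_as_str : String) (out : String) : Prop :=
  out = read_matrix_columns_alt matrix_as_str
instance (matrix_as_str : String) (out : String) : Decidable (Spec_read_matrix_columns matrix_as_str out) := by
  unfold Spec_read_matrix_columns; infer_instance

-- ===== CLAIM (what is proved, stated in full; the proofs are below) =====
def Claim_equal_read_matrix_columns : Prop := ∀ (matrix_as_str : String), Dom_read_matrix_columns matrix_as_str → Pre_read_matrix_columns matrix_as_str → Spec_read_matrix_columns matrix_as_str (read_matrix_columns matrix_as_str)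

-- ===== LEMMAS AND PROOFS =====


-- ''.join over a cons
theorem pv_join_empty_cons (x : String) (xs : List String) :
    PySem.Str.join "" (x :: xs) = x ++ PySem.Str.join "" xs := by
  have h : ∀ (p : List Char) (ps : List (List Char)),
      PySem.Chars.join [] (p :: ps) = p ++ PySem.Chars.join [] ps := by
    intro p ps
    cases ps with
    | nil => simp [PySem.Chars.join_singleton, PySem.Chars.join_nil]
    | cons q rest => simp [PySem.Chars.join_cons_cons]
  apply String.toList_injective
  simp [PySem.Str.join, h]

-- a 'result += g(i)' loop is ''.join(map(g, l))
theorem pv_foldl_strcat (l : List Int) (g : Int → String) (a : String) :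
    l.foldl (fun r i => r ++ g i) a = a ++ PySem.Str.join "" (l.map g) := by
  induction l generalizing a with
  | nil =>
    have : PySem.Str.join "" ([] : List String) = "" := by
      apply String.toList_injective
      simp [PySem.Str.join, PySem.Chars.join_nil]
    simp [this]
  | cons x t ih =>
    simp only [List.foldl_cons, List.map_cons, pv_join_empty_cons, ih (a ++ g x)]
    simp [String.append_assoc]

-- B's row-major pass leaves exactly the transposed columns
theorem pv_cols_fold (rs : List (List Int)) (n : Int) (c : Int → List Int) :
    rs.foldl
      (fun cols row => (PySem.List.pyRange 0 n 1).map
        (fun i => PySem.List.pyGetD cols i [] ++ [PySem.List.pyGetD row i 0]))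
      ((PySem.List.pyRange 0 n 1).map c)
    = (PySem.List.pyRange 0 n 1).map
        (fun i => c i ++ rs.map (fun r => PySem.List.pyGetD r i 0)) := by
  induction rs generalizing c with
  | nil => simp
  | cons r rs ih =>
    simp only [List.foldl_cons]
    have hstep : (PySem.List.pyRange 0 n 1).map
        (fun i => PySem.List.pyGetD ((PySem.List.pyRange 0 n 1).map c) i []
          ++ [PySem.List.pyGetD r i 0])
        = (PySem.List.pyRange 0 n 1).map (fun i => c i ++ [PySem.List.pyGetD r i 0]) := by
      apply List.map_congr_left
      intro i hi
      rw [PySem.List.mem_pyRange_one] at hi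
      rw [PySem.List.pyGetD_map_pyRange_of_nonneg c n i [] hi.1 hi.2]
    rw [hstep, ih (fun i => c i ++ [PySem.List.pyGetD r i 0])]
    simp [List.append_assoc]

-- one transposed column, read the way port A reads it
theorem pv_column_eq (rows : List (List Int)) (i : Int) :
    (PySem.List.pyRange 0 (rows.length : Int) 1).map
      (fun j => PySem.List.pyGetD (PySem.List.pyGetD rows j []) i 0)
    = rows.map (fun r => PySem.List.pyGetD r i 0) := by
  have h := congrArg (List.map (fun r => PySem.List.pyGetD r i 0))
    (PySem.List.map_pyGetD_pyRange_zero' rows [])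
  simpa [List.map_map] using h

-- ===== VERDICT (by name: the statement is the Claim_ definition above) =====
theorem read_matrix_columns_spec : Claim_equal_read_matrix_columns := by
  intro s _ _
  unfold Spec_read_matrix_columns read_matrix_columns read_matrix_columns_alt matrix_str_to_list
  rw [PySem.List.foldl_append_singleton_eq_map]
  simp only [List.nil_append]
  set rows := ((PySem.Str.split? s "
").getD []).map
    (fun line => (PySem.Str.split₀ line).map (fun tok => (PySem.Int.ofStr? tok).getD 0)) with hrows
  simp only [PySem.List.foldl_append_singleton_eq_map, List.nil_append, pv_column_eq,
    pv_cols_fold, List.map_map]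
  rw [pv_foldl_strcat]
  simp [Function.comp_def]
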